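-- pv_equiv track=rewrite | github.com/shenxiangzhuang/data-structures-and-algorithms-in-python | code/Chap3 Algorithm Analysis.py | example2
-- ===== SOURCE A (Python) =====
-- def example2(S):
--     """Return the sum of the elemnets in sequnce S."""
--     n = len(S)
--     total = 0
--     count = 0
--     for j in range(0, n, 2):
--         total += S[j]
--         count += 1
--     return total, count
-- ===== SOURCE B (Python) =====
-- def example2(S):
--     """Return the sum of the elemnets in sequnce S."""
--     return sum(S[::2]), (len(S) + 1) // 2
-- ===== Notes on version B (the rewrite author's own statement) =====
-- stated objective: simpler
-- what changed: Replaces the explicit index-stepping loop with built-in machinery: the sum is taken over the stride-2 slice S[::2] and the count is the closed form (len(S)+1)//2, so no loop counter is maintained at all.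
import Mathlib
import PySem

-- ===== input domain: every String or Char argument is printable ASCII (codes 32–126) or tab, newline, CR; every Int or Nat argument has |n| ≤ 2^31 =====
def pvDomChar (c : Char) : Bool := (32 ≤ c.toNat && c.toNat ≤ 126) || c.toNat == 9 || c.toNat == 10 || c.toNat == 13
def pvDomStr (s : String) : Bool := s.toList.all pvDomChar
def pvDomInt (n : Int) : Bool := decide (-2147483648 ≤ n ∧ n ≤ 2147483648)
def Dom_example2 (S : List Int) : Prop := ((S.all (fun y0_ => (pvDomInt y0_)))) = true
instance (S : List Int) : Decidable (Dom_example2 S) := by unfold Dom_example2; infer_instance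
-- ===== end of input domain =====

-- B replaces the index-stepping loop with sum over the stride-2 slice S[::2] and the
-- closed-form count (len(S)+1)//2 (objective: simpler).

-- ===== PORT A =====
def example2 (S : List Int) : Int × Int :=
  -- n = len(S); total = 0; count = 0; for j in range(0, n, 2): total += S[j]; count += 1
  -- (S[j] is always in range here, so pyGetD's default is never used)
  let n : Int := (S.length : Int)
  (PySem.List.pyRange 0 n 2).foldl
    (fun (acc : Int × Int) j => (acc.1 + PySem.List.pyGetD S j 0, acc.2 + 1)) (0, 0)

-- ===== PORT B =====
def example2_alt (S : List Int) : Int × Int :=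
  -- return sum(S[::2]), (len(S) + 1) // 2
  (((PySem.List.slice? S none none 2).getD []).sum,
   PySem.Int.floordiv ((S.length : Int) + 1) 2)

-- ===== PRECONDITION & SPEC =====
def Spec_example2 (S : List Int) (out : Int × Int) : Prop := out = example2_alt S
instance (S : List Int) (out : Int × Int) : Decidable (Spec_example2 S out) := by unfold Spec_example2; infer_instance

-- ===== CLAIM (what is proved, stated in full; the proofs are below) =====
def Claim_equal_example2 : Prop := ∀ (S : List Int), Dom_example2 S → Spec_example2 S (example2 S)

-- ===== LEMMAS AND PROOFS =====

/-- The pair-accumulating fold of port A is (sum of values, length). -/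
theorem foldl_pair_sum_len (l : List Int) (f : Int → Int) (t c : Int) :
    l.foldl (fun (acc : Int × Int) j => (acc.1 + f j, acc.2 + 1)) (t, c)
      = (t + (l.map f).sum, c + l.length) := by
  induction l generalizing t c with
  | nil => simp
  | cons x xs ih => simp [ih, add_assoc]; ring

theorem example2_spec : Claim_equal_example2 := by
  intro S _
  unfold Spec_example2 example2 example2_alt
  simp only [PySem.List.pyRange, PySem.List.slice?, PySem.List.sliceIndices]
  norm_num
  have hcnt : (if 0 < S.length then (((S.length:Int) + 2 - 1) / 2).toNat else 0)
      = (S.length+1)/2 := by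
    split <;> omega
  rw [hcnt, foldl_pair_sum_len]
  have hmap : List.filterMap (fun x : Nat => S[((2:Int) * ↑x).toNat]?)
        (List.range ((S.length+1)/2))
      = (List.map (fun k : Nat => (2:Int) * ↑k) (List.range ((S.length+1)/2))).map
        (fun j => PySem.List.pyGetD S j 0) := by
    rw [List.map_map]
    rw [List.filterMap_congr (g := fun x : Nat =>
        some (PySem.List.pyGetD S ((2:Int)*↑x) 0))]
    · simp
    · intro x hx
      simp only [List.mem_range] at hx
      have hb : 2*x < S.length := by omega
      have h0 : (0:Int) ≤ 2*(x:Int) := by positivity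
      have h2 : (2:Int)*↑x < (S.length : Int) := by exact_mod_cast by omega
      rw [PySem.List.pyGetD_eq_getElem S 0 h0 h2, List.getElem?_eq_getElem (by omega)]
  rw [hmap]
  simp only [zero_add, List.length_map, List.length_range, Prod.mk.injEq]
  exact ⟨trivial, by omega⟩
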